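-- pv_equiv track=rewrite | github.com/DeividasLT5/Bioinformatika | Pirma.py | parseSegmentsFromFrames
-- ===== SOURCE A (Python) =====
-- def parseSegmentsFromFrames(frameList):
--     parsedSegments = []
--     for frame in frameList:
--         afterStartCodon = False
--         temp = []
--         for codon in frame:
--             if codon == "ATG":
--                 afterStartCodon = True
--             if afterStartCodon:
--                 temp.append(codon)
--             if (codon == "TAA" or codon == "TAG" or codon == "TGA") and afterStartCodon:
--                 afterStartCodon = False
--                 parsedSegments.append(temp)
--                 temp = []
--     return parsedSegments
-- ===== SOURCE B (Python) =====
-- STOPS = ("TAA", "TAG", "TGA")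
--
--
-- def splitAtStop(frame):
--     """Split off the prefix up to and including the first stop codon.
--     Returns (segment, remainder) or None if frame has no stop codon."""
--     for k, c in enumerate(frame):
--         if c in STOPS:
--             return list(frame[:k + 1]), frame[k + 1:]
--     return None
--
--
-- def scanFrame(frame):
--     """ORF segments of one frame: from each first ATG to the next stop codon."""
--     segs = []
--     while frame:
--         if frame[0] == "ATG":
--             r = splitAtStop(frame)
--             if r is None:
--                 break
--             seg, frame = r
--             segs.append(seg)
--         else:
--             frame = frame[1:]
--     return segs
--
--
-- def parseSegmentsFromFrames(frameList):
--     out = []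
--     for frame in frameList:
--         out.extend(scanFrame(frame))
--     return out
-- ===== Notes on version B (the rewrite author's own statement) =====
-- stated objective: simpler
-- what changed: Replaces A's afterStartCodon/temp state machine over codons with a find-ATG-then-split-at-first-stop slicing decomposition (splitAtStop + scanFrame per frame).
import Mathlib
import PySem

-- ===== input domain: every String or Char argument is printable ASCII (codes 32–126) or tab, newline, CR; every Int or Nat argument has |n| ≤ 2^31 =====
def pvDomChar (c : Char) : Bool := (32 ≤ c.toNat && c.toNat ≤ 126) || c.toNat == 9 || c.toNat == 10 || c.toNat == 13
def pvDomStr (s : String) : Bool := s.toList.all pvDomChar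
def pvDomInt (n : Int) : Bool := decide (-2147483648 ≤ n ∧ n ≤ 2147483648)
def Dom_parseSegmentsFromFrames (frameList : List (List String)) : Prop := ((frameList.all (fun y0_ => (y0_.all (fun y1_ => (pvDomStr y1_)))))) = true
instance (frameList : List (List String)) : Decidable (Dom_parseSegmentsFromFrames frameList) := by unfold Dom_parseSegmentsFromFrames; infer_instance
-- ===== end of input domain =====

-- B replaces A's afterStartCodon/temp state machine with a find-ATG-then-split-at-first-stop
-- slicing decomposition (objective: simpler); return values agree on all inputs.

-- ===== PORT A =====
-- one codon step of A's inner loop over a frame: (afterStartCodon, temp, parsedSegments)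
def stepA (st : Bool × List String × List (List String)) (codon : String) :
    Bool × List String × List (List String) :=
  let after := if codon = "ATG" then true else st.1
  let temp := if after then st.2.1 ++ [codon] else st.2.1
  if (codon = "TAA" ∨ codon = "TAG" ∨ codon = "TGA") ∧ after = true then
    (false, ([], st.2.2 ++ [temp]))
  else (after, (temp, st.2.2))

def parseSegmentsFromFrames (frameList : List (List String)) : List (List String) :=
  frameList.foldl (fun acc frame => (frame.foldl stepA (false, ([], acc))).2.2) []

-- ===== PORT B =====
-- splitAtStop frame = some (prefix up to and including first stop codon, remainder), none if no stop
def splitAtStop : List String → Option (List String × List String)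
  | [] => none
  | c :: rest =>
    if c = "TAA" ∨ c = "TAG" ∨ c = "TGA" then some ([c], rest)
    else
      match splitAtStop rest with
      | none => none
      | some (seg, rem) => some (c :: seg, rem)

-- termination helper for scanFrame (cited in decreasing_by)
theorem splitAtStop_length : ∀ (xs seg rem : List String),
    splitAtStop xs = some (seg, rem) → rem.length < xs.length := by
  intro xs
  induction xs with
  | nil => simp [splitAtStop]
  | cons c rest ih =>
    intro seg rem h
    rw [splitAtStop] at h
    split at h
    · cases h; simp
    · revert h
      cases hs : splitAtStop rest with
      | none => intro h; cases h
      | some p =>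
        obtain ⟨s, r⟩ := p
        intro h
        simp only [Option.some.injEq, Prod.mk.injEq] at h
        obtain ⟨h3, h4⟩ := h
        subst h4
        have := ih s r hs
        simp
        omega

def scanFrame : List String → List (List String)
  | [] => []
  | c :: rest =>
    if c = "ATG" then
      match hs : splitAtStop (c :: rest) with
      | none => []
      | some (seg, rem) => seg :: scanFrame rem
    else scanFrame rest
termination_by frame => frame.length
decreasing_by
  · exact splitAtStop_length _ _ _ hs
  · simp

def parseSegmentsFromFrames_alt (frameList : List (List String)) : List (List String) :=
  frameList.foldl (fun out frame => out ++ scanFrame frame) []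

-- ===== PRECONDITION & SPEC =====
def Spec_parseSegmentsFromFrames (frameList : List (List String)) (out : List (List String)) : Prop := out = parseSegmentsFromFrames_alt frameList
instance (frameList : List (List String)) (out : List (List String)) : Decidable (Spec_parseSegmentsFromFrames frameList out) := by unfold Spec_parseSegmentsFromFrames; infer_instance

-- ===== CLAIM (what is proved, stated in full; the proofs are below) =====
def Claim_equal_parseSegmentsFromFrames : Prop := ∀ (frameList : List (List String)), Dom_parseSegmentsFromFrames frameList → Spec_parseSegmentsFromFrames frameList (parseSegmentsFromFrames frameList)

-- ===== LEMMAS AND PROOFS =====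

theorem scanFrame_not_ATG (c : String) (rest : List String) (hc : c ≠ "ATG") :
    scanFrame (c :: rest) = scanFrame rest := by
  rw [scanFrame, if_neg hc]

theorem scanFrame_ATG_none (rest : List String)
    (h : splitAtStop ("ATG" :: rest) = none) : scanFrame ("ATG" :: rest) = [] := by
  rw [scanFrame, if_pos rfl]
  split
  · rfl
  · rename_i seg rem heq
    rw [h] at heq
    cases heq

theorem scanFrame_ATG_some (rest seg rem : List String)
    (h : splitAtStop ("ATG" :: rest) = some (seg, rem)) :
    scanFrame ("ATG" :: rest) = seg :: scanFrame rem := by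
  rw [scanFrame, if_pos rfl]
  split
  · rename_i heq
    rw [h] at heq
    cases heq
  · rename_i s r heq
    rw [h] at heq
    cases heq
    rfl

-- A's inner fold, idle (afterStartCodon = false) and running (true), characterised by B's helpers
theorem stepA_both : ∀ (n : Nat) (frame : List String), frame.length ≤ n →
    (∀ segs, (frame.foldl stepA (false, ([], segs))).2.2 = segs ++ scanFrame frame) ∧
    (∀ temp segs, (frame.foldl stepA (true, (temp, segs))).2.2 =
      match splitAtStop frame with
      | none => segs
      | some (seg, rem) => segs ++ (temp ++ seg) :: scanFrame rem) := by
  intro n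
  induction n with
  | zero =>
    intro frame h
    have : frame = [] := List.eq_nil_of_length_eq_zero (Nat.le_zero.mp h)
    subst this
    exact ⟨fun segs => by simp [scanFrame], fun temp segs => by simp [splitAtStop]⟩
  | succ n ih =>
    intro frame h
    cases frame with
    | nil => exact ⟨fun segs => by simp [scanFrame], fun temp segs => by simp [splitAtStop]⟩
    | cons c rest =>
      have hr : rest.length ≤ n := by simp at h; omega
      constructor
      · intro segs
        by_cases hc : c = "ATG"
        · subst hc
          have hstep : stepA (false, ([], segs)) "ATG" = (true, (["ATG"], segs)) := by
            simp [stepA]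
          rw [List.foldl_cons, hstep, (ih rest hr).2 ["ATG"] segs]
          cases hs : splitAtStop rest with
          | none =>
            have hsp : splitAtStop ("ATG" :: rest) = none := by simp [splitAtStop, hs]
            rw [scanFrame_ATG_none rest hsp]
            simp
          | some p =>
            obtain ⟨seg, rem⟩ := p
            have hsp : splitAtStop ("ATG" :: rest) = some ("ATG" :: seg, rem) := by
              simp [splitAtStop, hs]
            rw [scanFrame_ATG_some rest _ _ hsp]
            simp
        · have hstep : stepA (false, ([], segs)) c = (false, ([], segs)) := by
            simp [stepA, hc]
          rw [List.foldl_cons, hstep, (ih rest hr).1 segs, scanFrame_not_ATG c rest hc]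
      · intro temp segs
        by_cases hstop : c = "TAA" ∨ c = "TAG" ∨ c = "TGA"
        · have hstep : stepA (true, (temp, segs)) c = (false, ([], segs ++ [temp ++ [c]])) := by
            simp [stepA, hstop]
          rw [List.foldl_cons, hstep, (ih rest hr).1 (segs ++ [temp ++ [c]])]
          have hsp : splitAtStop (c :: rest) = some ([c], rest) := by
            simp [splitAtStop, hstop]
          simp [hsp]
        · have hstep : stepA (true, (temp, segs)) c = (true, (temp ++ [c], segs)) := by
            simp [stepA, hstop]
          rw [List.foldl_cons, hstep, (ih rest hr).2 (temp ++ [c]) segs]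
          cases hs : splitAtStop rest with
          | none =>
            have hsp : splitAtStop (c :: rest) = none := by simp [splitAtStop, hstop, hs]
            simp [hsp]
          | some p =>
            obtain ⟨seg, rem⟩ := p
            have hsp : splitAtStop (c :: rest) = some (c :: seg, rem) := by
              simp [splitAtStop, hstop, hs]
            simp [hsp]

theorem frame_fold (frame : List String) (segs : List (List String)) :
    (frame.foldl stepA (false, ([], segs))).2.2 = segs ++ scanFrame frame :=
  (stepA_both frame.length frame le_rfl).1 segs

theorem outer_fold (fl : List (List String)) (acc : List (List String)) :
    fl.foldl (fun acc frame => (frame.foldl stepA (false, ([], acc))).2.2) acc =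
      fl.foldl (fun out frame => out ++ scanFrame frame) acc := by
  simp only [frame_fold]

-- ===== VERDICT (by name: the statement is the Claim_ definition above) =====
theorem parseSegmentsFromFrames_spec : Claim_equal_parseSegmentsFromFrames := by
  intro fl _
  unfold Spec_parseSegmentsFromFrames parseSegmentsFromFrames parseSegmentsFromFrames_alt
  exact outer_fold fl []
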